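-- pv_equiv track=rewrite | github.com/KasumiNova/TACZ-Legacy | scripts/convert_lang_json_to_lang.py | strip_json_comments
-- ===== SOURCE A (Python) =====
-- from typing import Dict, List, Tuple
--
-- def strip_json_comments(content: str) -> str:
--     out: List[str] = []
--     i = 0
--     in_string = False
--     escaped = False
--     in_line_comment = False
--     in_block_comment = False
--
--     while i < len(content):
--         ch = content[i]
--         nxt = content[i + 1] if i + 1 < len(content) else "\0"
--
--         if in_line_comment:
--             if ch in "\r\n":
--                 in_line_comment = False
--                 out.append(ch)
--             i += 1
--             continue
--
--         if in_block_comment: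
--             if ch == "*" and nxt == "/":
--                 in_block_comment = False
--                 i += 2
--             else:
--                 i += 1
--             continue
--
--         if in_string:
--             out.append(ch)
--             if escaped:
--                 escaped = False
--             elif ch == "\\":
--                 escaped = True
--             elif ch == '"':
--                 in_string = False
--             i += 1
--             continue
--
--         if ch == '"':
--             in_string = True
--             out.append(ch)
--             i += 1
--             continue
--
--         if ch == "/" and nxt == "/":
--             in_line_comment = True
--             i += 2
--             continue
--
--         if ch == "/" and nxt == "*":
--             in_block_comment = True
--             i += 2
--             continue
--
--         out.append(ch)
--         i += 1
--
--     return "".join(out)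
-- ===== SOURCE B (Python) =====
-- def strip_json_comments(content: str) -> str:
--     parts = []
--     s = content
--     while s:
--         if s.startswith('//'):
--             s = s[2:]
--             j = 0
--             while j < len(s) and s[j] not in '\r\n':
--                 j += 1
--             s = s[j:]  # keep the newline; it is emitted by the default branch
--         elif s.startswith('/*'):
--             end = s.find('*/', 2)
--             s = '' if end == -1 else s[end + 2:]
--         elif s[0] == '"':
--             j = 1
--             while j < len(s):
--                 if s[j] == '\\':
--                     j += 2
--                 elif s[j] == '"':
--                     j += 1
--                     break
--                 else:
--                     j += 1
--             j = min(j, len(s))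
--             parts.append(s[:j])
--             s = s[j:]
--         else:
--             parts.append(s[0])
--             s = s[1:]
--     return ''.join(parts)
-- ===== Notes on version B (the rewrite author's own statement) =====
-- stated objective: alternative
-- what changed: Replaced the single character-by-character state machine with five boolean flags by a token-level scanner that dispatches on the current prefix ('//', '/*', '"', other) and consumes each whole token (line comment, block comment, string literal) with a dedicated helper in one step.
import Mathlib
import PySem

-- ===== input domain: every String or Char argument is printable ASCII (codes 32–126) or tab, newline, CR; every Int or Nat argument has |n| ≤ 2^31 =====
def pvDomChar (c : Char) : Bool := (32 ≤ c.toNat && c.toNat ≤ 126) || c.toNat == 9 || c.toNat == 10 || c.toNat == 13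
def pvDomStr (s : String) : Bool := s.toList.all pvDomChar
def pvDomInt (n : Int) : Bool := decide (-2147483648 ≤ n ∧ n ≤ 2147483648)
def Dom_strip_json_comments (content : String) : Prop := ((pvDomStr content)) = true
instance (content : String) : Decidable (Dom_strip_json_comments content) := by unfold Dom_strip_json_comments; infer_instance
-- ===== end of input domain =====

-- B replaces A's flag-based character state machine by a token-level scanner (same cost, different decomposition).

-- ===== PORT A =====
-- A's while loop over index i with flags, as recursion on the remaining characters;
-- `i += 2` is `rest.tail`, the `nxt` sentinel '\0' is `rest.headD '\x00'`.
def aGo (cs : List Char) (inS esc lineC blockC : Bool) (out : List Char) : List Char :=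
  match cs with
  | [] => out
  | ch :: rest =>
    let nxt := rest.headD '\x00'
    if lineC then
      if ch == '\r' || ch == '\n' then aGo rest inS esc false blockC (out ++ [ch])
      else aGo rest inS esc lineC blockC out
    else if blockC then
      if ch == '*' && nxt == '/' then aGo rest.tail inS esc lineC false out
      else aGo rest inS esc lineC blockC out
    else if inS then
      if esc then aGo rest inS false lineC blockC (out ++ [ch])
      else if ch == '\\' then aGo rest inS true lineC blockC (out ++ [ch])
      else if ch == '"' then aGo rest false esc lineC blockC (out ++ [ch])
      else aGo rest inS esc lineC blockC (out ++ [ch])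
    else if ch == '"' then aGo rest true esc lineC blockC (out ++ [ch])
    else if ch == '/' && nxt == '/' then aGo rest.tail inS esc true blockC out
    else if ch == '/' && nxt == '*' then aGo rest.tail inS esc lineC true out
    else aGo rest inS esc lineC blockC (out ++ [ch])
termination_by cs.length
decreasing_by all_goals simp [List.length_tail]

def strip_json_comments (content : String) : String :=
  String.mk (aGo content.toList false false false false [])

-- ===== PORT B =====
-- Source B's inner `while j` loop after '//': skip to the next newline (newline itself is kept).
def bDropLine (cs : List Char) : List Char :=
  cs.dropWhile (fun c => !(c == '\r' || c == '\n'))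

-- Source B's `s.find('*/', 2)`: drop through the first "*/" (everything if none).
def bDropBlock (cs : List Char) : List Char :=
  match cs with
  | [] => []
  | '*' :: '/' :: r => r
  | _ :: r => bDropBlock r

-- Source B's string-literal loop: the literal's body (after the opening quote) and the rest.
def bTakeStr (cs : List Char) : List Char × List Char :=
  match cs with
  | [] => ([], [])
  | '\\' :: [] => (['\\'], [])
  | '\\' :: c :: r => let p := bTakeStr r; ('\\' :: c :: p.1, p.2)
  | '"' :: r => (['"'], r)
  | c :: r => let p := bTakeStr r; (c :: p.1, p.2)

theorem bTakeStr_snd_len (cs : List Char) : (bTakeStr cs).2.length ≤ cs.length := by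
  induction cs using bTakeStr.induct <;> simp_all [bTakeStr] <;> omega

theorem bDropLine_len (cs : List Char) : (bDropLine cs).length ≤ cs.length := by
  simpa [bDropLine] using List.length_dropWhile_le _ _

theorem bDropBlock_len (cs : List Char) : (bDropBlock cs).length ≤ cs.length := by
  induction cs using bDropBlock.induct <;> simp_all [bDropBlock] <;> omega

-- Source B's main while loop: dispatch on the current prefix and consume a whole token.
def bGo (cs : List Char) : List Char :=
  match cs with
  | [] => []
  | '/' :: '/' :: r => bGo (bDropLine r)
  | '/' :: '*' :: r => bGo (bDropBlock r)
  | '"' :: r =>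
    let p := bTakeStr r
    '"' :: p.1 ++ bGo p.2
  | c :: r => c :: bGo r
termination_by cs.length
decreasing_by
  · have := bDropLine_len r; simp; omega
  · have := bDropBlock_len r; simp; omega
  · have := bTakeStr_snd_len r; simp; omega
  · simp

def strip_json_comments_alt (content : String) : String :=
  String.mk (bGo content.toList)

-- ===== PRECONDITION & SPEC =====
def Spec_strip_json_comments (content : String) (out : String) : Prop := out = strip_json_comments_alt content
instance (content : String) (out : String) : Decidable (Spec_strip_json_comments content out) := by unfold Spec_strip_json_comments; infer_instance

-- ===== CLAIM =====
def Claim_equal_strip_json_comments : Prop :=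
  ∀ (content : String), Dom_strip_json_comments content → Spec_strip_json_comments content (strip_json_comments content)

-- ===== LEMMAS AND PROOFS =====
theorem aGo_line (cs : List Char) (out : List Char) :
    aGo cs false false true false out = aGo (bDropLine cs) false false false false out := by
  induction cs generalizing out with
  | nil => simp [aGo, bDropLine]
  | cons ch rest ih =>
    by_cases hr : ch = '\r'
    · subst hr; simp [aGo, bDropLine]
    · by_cases hn : ch = '\n'
      · subst hn; simp [aGo, bDropLine]
      · simp [aGo, bDropLine, hr, hn, ih]

theorem aGo_block (cs : List Char) (out : List Char) :
    aGo cs false false false true out = aGo (bDropBlock cs) false false false false out := by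
  induction cs using bDropBlock.induct generalizing out with
  | case1 => simp [aGo, bDropBlock]
  | case2 r => simp [aGo, bDropBlock]
  | case3 c r hne ih =>
    have hA : ¬(c = '*' ∧ r.head?.getD '\x00' = '/') := by
      rintro ⟨hc, hh⟩
      cases r with
      | nil => simp at hh
      | cons a t => simp at hh; exact hne t hc (by rw [hh])
    simp [aGo, bDropBlock, hA, ih]

theorem aGo_string (cs : List Char) (out : List Char) :
    aGo cs true false false false out = aGo (bTakeStr cs).2 false false false false (out ++ (bTakeStr cs).1) := by
  induction cs using bTakeStr.induct generalizing out with
  | case1 => simp [aGo, bTakeStr]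
  | case2 => simp [aGo, bTakeStr]
  | case3 c r ih =>
    simp [aGo, bTakeStr, ih]
  | case4 r => simp [aGo, bTakeStr]
  | case5 c r h1 h2 h3 ih =>
    have hc : c ≠ '\\' := by
      intro h
      cases r with
      | nil => exact h1 h rfl
      | cons a t => exact h2 a t h rfl
    simp [aGo, bTakeStr, hc, ih]
    exact fun h => absurd h h3

theorem aGo_eq_bGo (cs : List Char) (out : List Char) :
    aGo cs false false false false out = out ++ bGo cs := by
  induction cs using bGo.induct generalizing out with
  | case1 => simp [aGo, bGo]
  | case2 r ih => simp [aGo, bGo, aGo_line, ih]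
  | case3 r ih => simp [aGo, bGo, aGo_block, ih]
  | case4 r p ih =>
    have ih' : ∀ out, aGo (bTakeStr r).2 false false false false out = out ++ bGo (bTakeStr r).2 := ih
    simp [aGo, bGo, aGo_string, ih']
  | case5 c r h1 h2 h3 ih =>
    have hA : ¬(c = '/' ∧ r.head?.getD '\x00' = '/') := by
      rintro ⟨hc, hh⟩
      cases r with
      | nil => simp at hh
      | cons a t => simp at hh; exact h1 t hc (by rw [hh])
    have hB : ¬(c = '/' ∧ r.head?.getD '\x00' = '*') := by
      rintro ⟨hc, hh⟩
      cases r with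
      | nil => simp at hh
      | cons a t => simp at hh; exact h2 t hc (by rw [hh])
    simp [aGo, bGo, hA, hB, ih]
    exact fun h => absurd h h3

-- ===== VERDICT =====
theorem strip_json_comments_spec : Claim_equal_strip_json_comments := by
  intro content _
  unfold Spec_strip_json_comments strip_json_comments strip_json_comments_alt
  rw [aGo_eq_bGo]; rfl
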